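-- pv_equiv track=rewrite | github.com/josecatela/sgcodewars | day41/day41.py | Yang_day41
-- ===== SOURCE A (Python) =====
-- def Yang_day41(apples):
--     idx,salv,good = [],[],[]
--     for i,box in enumerate(apples):
--         if box.count(0)==1:
--             idx.append(i)
--             salv.append(box[1] if box[0]==0 else box[0])
--             good.append(None)
--         elif box.count(0)==0:
--             good.append(box)
--         else:
--             good.append(None)
--     while len(salv)>1:
--         good[idx[0]] = [salv[0],salv[1]]
--         idx = idx[2:]
--         salv = salv[2:]
--     return [x for x in good if x]
-- ===== SOURCE B (Python) =====
-- def Yang_day41(apples):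
--     # Single online pass, no index bookkeeping: while a single-zero box awaits its
--     # partner, later zero-free boxes are buffered in a "hole buffer" and flushed
--     # right after the pair is emitted at the first box's place.
--     out = []
--     pending = None  # (salvage value, zero-free boxes seen since)
--     for box in apples:
--         z = box.count(0)
--         if z == 1:
--             s = box[1] if box[0] == 0 else box[0]
--             if pending is None:
--                 pending = (s, [])
--             else:
--                 out.append([pending[0], s])
--                 out.extend(pending[1])
--                 pending = None
--         elif z == 0 and box:
--             if pending is None:
--                 out.append(box)
--             else:
--                 pending[1].append(box)
--     if pending is not None:
--         out.extend(pending[1])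
--     return out
-- ===== Notes on version B (the rewrite author's own statement) =====
-- stated objective: alternative
-- what changed: Replaces A's three parallel lists plus the destructive while-loop that repeatedly slices idx[2:]/salv[2:] and writes pairs into the good list by index (followed by a truthiness filter) with a single online pass: a pending salvage value plus a hole buffer of zero-free boxes, flushed right after its pair is emitted, so no indices, no placeholders and no final filter exist at all.
import Mathlib
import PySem

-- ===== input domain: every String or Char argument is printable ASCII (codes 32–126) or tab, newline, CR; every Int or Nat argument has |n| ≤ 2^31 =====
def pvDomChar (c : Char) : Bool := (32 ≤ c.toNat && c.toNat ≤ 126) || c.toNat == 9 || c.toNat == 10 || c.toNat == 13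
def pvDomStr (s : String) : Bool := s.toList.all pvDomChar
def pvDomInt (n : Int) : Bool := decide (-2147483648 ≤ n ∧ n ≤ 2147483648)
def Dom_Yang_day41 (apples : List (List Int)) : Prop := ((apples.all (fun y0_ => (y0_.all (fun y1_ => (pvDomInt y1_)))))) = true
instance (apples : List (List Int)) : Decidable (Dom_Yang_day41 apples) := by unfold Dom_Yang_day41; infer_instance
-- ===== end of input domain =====

-- B replaces A's three parallel lists + index-addressed slicing while-loop by a single
-- online pass with a pending salvage value and a hole buffer (alternative decomposition).

-- `box[1] if box[0]==0 else box[0]` (both Pythons contain this expression verbatim).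
-- Exact wherever Python does not raise; the .getD 0 defaults are reachable only for the
-- box [0], where Python raises IndexError — excluded by Pre_Yang_day41.
def pvSalv (box : List Int) : Int :=
  if (PySem.List.pyGet? box 0).getD 0 = 0 then (PySem.List.pyGet? box 1).getD 0
  else (PySem.List.pyGet? box 0).getD 0

-- ===== PORT A =====
-- the `while len(salv)>1` loop: good[idx[0]] = [salv[0],salv[1]]; idx = idx[2:]; salv = salv[2:]
def Yang_day41_pairLoop : List Int → List Int → List (Option (List Int)) → List (Option (List Int))
  | idx, s0 :: s1 :: srest, good =>
      Yang_day41_pairLoop (idx.drop 2) srest (good.set (idx.headD 0).toNat (some [s0, s1]))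
  | _, _, good => good

def Yang_day41 (apples : List (List Int)) : List (List Int) :=
  let t := (PySem.List.enumerate apples 0).foldl
    (fun (acc : List Int × List Int × List (Option (List Int))) ib =>
      if PySem.List.count ib.2 (0:Int) = 1 then
        (acc.1 ++ [ib.1], acc.2.1 ++ [pvSalv ib.2], acc.2.2 ++ [none])
      else if PySem.List.count ib.2 (0:Int) = 0 then
        (acc.1, acc.2.1, acc.2.2 ++ [some ib.2])
      else (acc.1, acc.2.1, acc.2.2 ++ [none]))
    ([], [], [])
  let good := Yang_day41_pairLoop t.1 t.2.1 t.2.2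
  -- [x for x in good if x] : truthy = a non-empty list (None and [] are falsy)
  good.filterMap (fun x => match x with
    | some b => if b = [] then none else some b
    | none => none)

-- ===== PORT B =====
-- one pass over the boxes: state = (output so far, pending = Option (salvage, hole buffer))
def Yang_day41_alt (apples : List (List Int)) : List (List Int) :=
  let st := apples.foldl
    (fun (acc : List (List Int) × Option (Int × List (List Int))) box =>
      if PySem.List.count box (0:Int) = 1 then
        match acc.2 with
        | none => (acc.1, some (pvSalv box, []))
        | some p => (acc.1 ++ [[p.1, pvSalv box]] ++ p.2, none)
      else if PySem.List.count box (0:Int) = 0 ∧ box ≠ [] then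
        match acc.2 with
        | none => (acc.1 ++ [box], acc.2)
        | some p => (acc.1, some (p.1, p.2 ++ [box]))
      else acc)
    ([], none)
  match st.2 with
  | some p => st.1 ++ p.2
  | none => st.1

-- ===== PRECONDITION & SPEC =====
-- Pre_ excludes exactly the inputs where Python A raises IndexError: a box equal to [0]
-- (single zero, box[0]==0, so box[1] is read out of range). B raises there too.
def Pre_Yang_day41 (apples : List (List Int)) : Prop := ∀ box ∈ apples, box ≠ [0]
instance (apples : List (List Int)) : Decidable (Pre_Yang_day41 apples) := by
  unfold Pre_Yang_day41; infer_instance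

def pvWitness_Yang_day41 : List (List Int) := [[1, 0, 2], [3, 4], [0, 5], [], [0, 0], [6, 0]]

def Spec_Yang_day41 (apples : List (List Int)) (out : List (List Int)) : Prop := out = Yang_day41_alt apples
instance (apples : List (List Int)) (out : List (List Int)) : Decidable (Spec_Yang_day41 apples out) := by unfold Spec_Yang_day41; infer_instance

-- ===== CLAIM (what is proved, stated in full; the proofs are below) =====
def Claim_equal_Yang_day41 : Prop := ∀ (apples : List (List Int)), Dom_Yang_day41 apples → Pre_Yang_day41 apples → Spec_Yang_day41 apples (Yang_day41 apples)

-- ===== LEMMAS AND PROOFS =====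

-- common specification: pvF = result with no pending single, pvG s buf = result with a
-- pending salvage s and the zero-free boxes buf buffered since the pending box
mutual
def pvF : List (List Int) → List (List Int)
  | [] => []
  | b :: l =>
    if PySem.List.count b (0:Int) = 1 then pvG (pvSalv b) [] l
    else if PySem.List.count b (0:Int) = 0 ∧ b ≠ [] then b :: pvF l
    else pvF l
def pvG : Int → List (List Int) → List (List Int) → List (List Int)
  | _, buf, [] => buf
  | s, buf, b :: l =>
    if PySem.List.count b (0:Int) = 1 then ([s, pvSalv b] :: buf) ++ pvF l
    else if PySem.List.count b (0:Int) = 0 ∧ b ≠ [] then pvG s (buf ++ [b]) l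
    else pvG s buf l
end

-- position/salvage/slot streams of A, defined structurally
def pvIdx : List (List Int) → List Int
  | [] => []
  | b :: l => if PySem.List.count b (0:Int) = 1 then 0 :: (pvIdx l).map (· + 1)
      else (pvIdx l).map (· + 1)

def pvSv : List (List Int) → List Int
  | [] => []
  | b :: l => if PySem.List.count b (0:Int) = 1 then pvSalv b :: pvSv l else pvSv l

def pvSlot (b : List Int) : Option (List Int) :=
  if PySem.List.count b (0:Int) = 1 then none
  else if PySem.List.count b (0:Int) = 0 then some b else none

def pvG0 (l : List (List Int)) : List (Option (List Int)) := l.map pvSlot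

-- Python's truthiness filter [x for x in good if x]
def pvFilt (g : List (Option (List Int))) : List (List Int) :=
  g.filterMap (fun x => match x with
    | some b => if b = [] then none else some b
    | none => none)

theorem pvFilt_append (g1 g2 : List (Option (List Int))) :
    pvFilt (g1 ++ g2) = pvFilt g1 ++ pvFilt g2 := by
  unfold pvFilt; exact List.filterMap_append

theorem pvIdx_nonneg (l : List (List Int)) : ∀ i ∈ pvIdx l, 0 ≤ i := by
  induction l with
  | nil => intro i h; cases h
  | cons b l ih =>
    intro i h
    unfold pvIdx at h
    split_ifs at h
    · rcases List.mem_cons.mp h with rfl | h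
      · omega
      · rcases List.mem_map.mp h with ⟨j, hj, rfl⟩; have := ih j hj; omega
    · rcases List.mem_map.mp h with ⟨j, hj, rfl⟩; have := ih j hj; omega

theorem pvSv_len_le (l : List (List Int)) : (pvSv l).length ≤ (pvIdx l).length := by
  induction l with
  | nil => simp [pvSv, pvIdx]
  | cons b l ih =>
    unfold pvSv pvIdx
    split_ifs <;> simp <;> omega

theorem pvIdx_cons (b : List Int) (l : List (List Int)) :
    pvIdx (b :: l) = if PySem.List.count b (0:Int) = 1 then 0 :: (pvIdx l).map (· + 1)
      else (pvIdx l).map (· + 1) := rfl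

theorem pvSv_cons (b : List Int) (l : List (List Int)) :
    pvSv (b :: l) = if PySem.List.count b (0:Int) = 1 then pvSalv b :: pvSv l else pvSv l := rfl

-- dummy structural recursion giving a two-at-a-time induction principle on List Int
def pvTwo : List Int → Nat
  | [] => 0
  | [_] => 0
  | _ :: _ :: r => pvTwo r + 1

-- shift lemma: if all indices point past a prefix, the prefix passes through pairLoop
theorem pv_shift (sv : List Int) : ∀ (idx : List Int) (pre g : List (Option (List Int))),
    sv.length ≤ idx.length → (∀ i ∈ idx, (pre.length : Int) ≤ i) →
    Yang_day41_pairLoop idx sv (pre ++ g)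
      = pre ++ Yang_day41_pairLoop (idx.map (· - (pre.length : Int))) sv g := by
  induction sv using pvTwo.induct with
  | case1 => intro idx pre g _ _; cases idx <;> rfl
  | case2 s => intro idx pre g _ _; cases idx <;> rfl
  | case3 s0 s1 rest ih =>
    intro idx pre g hlen hge
    match idx with
    | [] => simp at hlen
    | i :: idx' =>
      have hi : (pre.length : Int) ≤ i := hge i List.mem_cons_self
      have hset : (pre ++ g).set i.toNat (some [s0, s1])
          = pre ++ g.set (i.toNat - pre.length) (some [s0, s1]) :=
        List.set_append_right _ _ (by omega)
      have htn : (i - (pre.length : Int)).toNat = i.toNat - pre.length := by omega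
      simp only [Yang_day41_pairLoop, List.map_cons, List.headD_cons, hset, htn,
        List.drop_succ_cons]
      rw [ih (idx'.drop 1) pre (g.set (i.toNat - pre.length) (some [s0, s1]))
        (by simp at hlen ⊢; have := List.length_drop (l := idx') (i := 1); omega)
        (fun j hj => hge j (List.mem_cons_of_mem _ (List.mem_of_mem_drop hj)))]
      rw [List.map_drop]

-- the pairLoop-then-filter pipeline satisfies the pvF/pvG recursion
theorem pv_main (l : List (List Int)) :
    (pvFilt (Yang_day41_pairLoop (pvIdx l) (pvSv l) (pvG0 l)) = pvF l)
    ∧ (∀ (s : Int) (buf : List (List Int)) (mid : List (Option (List Int))),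
        pvFilt mid = buf →
        pvFilt (Yang_day41_pairLoop (0 :: (pvIdx l).map (· + (1 + (mid.length : Int))))
          (s :: pvSv l) ((none :: mid) ++ pvG0 l)) = pvG s buf l) := by
  induction l with
  | nil =>
    constructor
    · rfl
    · intro s buf mid h
      show pvFilt (none :: mid ++ []) = pvG s buf []
      simp only [List.append_nil, pvG]
      rw [show pvFilt (none :: mid) = pvFilt mid from rfl, h]
  | cons b l ih =>
    have hge2 : ∀ (k : Int), 0 ≤ k → ∀ i ∈ (pvIdx l).map (· + k), k ≤ i := by
      intro k hk i hi
      rcases List.mem_map.mp hi with ⟨x, hx, rfl⟩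
      have := pvIdx_nonneg l x hx
      omega
    have hlen2 : ∀ (k : Int), (pvSv l).length ≤ ((pvIdx l).map (· + k)).length := by
      intro k; rw [List.length_map]; exact pvSv_len_le l
    have hQ : ∀ (s : Int) (buf : List (List Int)) (mid : List (Option (List Int))),
        pvFilt mid = buf →
        pvFilt (Yang_day41_pairLoop (0 :: (pvIdx (b :: l)).map (· + (1 + (mid.length : Int))))
          (s :: pvSv (b :: l)) ((none :: mid) ++ pvG0 (b :: l))) = pvG s buf (b :: l) := by
      intro s buf mid hmid
      by_cases h1 : PySem.List.count b (0:Int) = 1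
      · -- partner found: the pair is written into slot 0, then everything shifts past it
        have hidx : (pvIdx (b :: l)).map (· + (1 + (mid.length : Int)))
            = (1 + (mid.length : Int)) :: (pvIdx l).map (· + (2 + (mid.length : Int))) := by
          rw [pvIdx_cons, if_pos h1]
          simp only [List.map_cons, List.map_map]
          congr 1
          · omega
          · apply List.map_congr_left; intro x _
            simp only [Function.comp_apply]; omega
        have hsv : pvSv (b :: l) = pvSalv b :: pvSv l := by rw [pvSv_cons, if_pos h1]
        have hg0 : pvG0 (b :: l) = none :: pvG0 l := by
          unfold pvG0 pvSlot; rw [List.map_cons, if_pos h1]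
        rw [hidx, hsv, hg0]
        rw [show Yang_day41_pairLoop
              (0 :: (1 + (mid.length : Int)) :: (pvIdx l).map (· + (2 + (mid.length : Int))))
              (s :: pvSalv b :: pvSv l) ((none :: mid) ++ none :: pvG0 l)
            = Yang_day41_pairLoop ((pvIdx l).map (· + (2 + (mid.length : Int)))) (pvSv l)
              ((some [s, pvSalv b] :: (mid ++ [none])) ++ pvG0 l) from by
          simp only [Yang_day41_pairLoop, List.headD_cons, List.drop_succ_cons, List.drop_zero]
          congr 1
          simp]
        rw [pv_shift (pvSv l) ((pvIdx l).map (· + (2 + (mid.length : Int))))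
          (some [s, pvSalv b] :: (mid ++ [none])) (pvG0 l)
          (hlen2 _) (by
            intro i hi
            have h := hge2 (2 + (mid.length : Int)) (by omega) i hi
            simp only [List.length_cons, List.length_append, List.length_nil]
            push_cast
            omega)]
        rw [show ((pvIdx l).map (· + (2 + (mid.length : Int)))).map
              (· - (((some [s, pvSalv b] :: (mid ++ [none])).length : Int))) = pvIdx l from by
          rw [List.map_map]
          rw [List.map_congr_left (g := fun x => x) (by
            intro x _
            simp only [Function.comp_apply, List.length_cons, List.length_append,
              List.length_nil]
            push_cast
            omega)]
          exact List.map_id' _]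
        rw [pvFilt_append, ih.1]
        rw [show pvG s buf (b :: l) = ([s, pvSalv b] :: buf) ++ pvF l from by
          simp only [pvG]; rw [if_pos h1]]
        rw [show pvFilt (some [s, pvSalv b] :: (mid ++ [none])) = [s, pvSalv b] :: pvFilt mid from by
          simp [pvFilt, List.filterMap_append], hmid]
      · -- no partner yet: the head's slot joins the buffer region after the pending hole
        have hidx2 : (pvIdx (b :: l)).map (· + (1 + (mid.length : Int)))
            = (pvIdx l).map (· + (1 + ((mid ++ [pvSlot b]).length : Int))) := by
          rw [pvIdx_cons, if_neg h1, List.map_map]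
          apply List.map_congr_left; intro x _
          simp only [Function.comp_apply, List.length_append, List.length_cons, List.length_nil]
          push_cast
          omega
        have hsv2 : pvSv (b :: l) = pvSv l := by rw [pvSv_cons, if_neg h1]
        have hg02 : pvG0 (b :: l) = pvSlot b :: pvG0 l := rfl
        rw [hidx2, hsv2, hg02]
        rw [show (none :: mid) ++ pvSlot b :: pvG0 l
            = (none :: (mid ++ [pvSlot b])) ++ pvG0 l from by simp]
        rw [ih.2 s (buf ++ pvFilt [pvSlot b]) (mid ++ [pvSlot b])
          (by rw [pvFilt_append, hmid])]
        by_cases h0 : PySem.List.count b (0:Int) = 0 ∧ b ≠ []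
        · rw [show pvFilt [pvSlot b] = [b] from by
            unfold pvSlot; rw [if_neg h1, if_pos h0.1]
            show pvFilt [some b] = [b]
            simp [pvFilt, h0.2]]
          rw [show pvG s buf (b :: l) = pvG s (buf ++ [b]) l from by
            simp only [pvG]; rw [if_neg h1, if_pos h0]]
        · rw [show pvFilt [pvSlot b] = [] from by
            unfold pvSlot
            rw [if_neg h1]
            by_cases hc : PySem.List.count b (0:Int) = 0
            · have hb : b = [] := by
                by_contra hb; exact h0 ⟨hc, hb⟩
              rw [if_pos hc, hb]; rfl
            · rw [if_neg hc]; rfl]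
          rw [List.append_nil]
          rw [show pvG s buf (b :: l) = pvG s buf l from by
            simp only [pvG]; rw [if_neg h1, if_neg h0]]
    refine ⟨?_, hQ⟩
    by_cases h1 : PySem.List.count b (0:Int) = 1
    · have h := ih.2 (pvSalv b) [] [] rfl
      simp only [List.length_nil, Nat.cast_zero, add_zero] at h
      rw [pvIdx_cons, if_pos h1, pvSv_cons, if_pos h1,
        show pvG0 (b :: l) = none :: pvG0 l from by
          unfold pvG0 pvSlot; rw [List.map_cons, if_pos h1]]
      rw [show pvF (b :: l) = pvG (pvSalv b) [] l from by
        simp only [pvF]; rw [if_pos h1]]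
      exact h
    · rw [pvIdx_cons, if_neg h1,
        show pvSv (b :: l) = pvSv l from by rw [pvSv_cons, if_neg h1],
        show pvG0 (b :: l) = [pvSlot b] ++ pvG0 l from rfl]
      rw [pv_shift (pvSv l) ((pvIdx l).map (· + 1)) [pvSlot b] (pvG0 l)
        (hlen2 _) (by
          intro i hi
          have h := hge2 1 (by omega) i hi
          simpa using h)]
      rw [show ((pvIdx l).map (· + 1)).map (· - (([pvSlot b] : List (Option (List Int))).length : Int))
          = pvIdx l from by
        rw [List.map_map]
        rw [List.map_congr_left (g := fun x => x) (by
          intro x _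
          simp only [Function.comp_apply, List.length_cons, List.length_nil]
          push_cast
          omega)]
        exact List.map_id' _]
      rw [pvFilt_append, ih.1]
      by_cases h0 : PySem.List.count b (0:Int) = 0 ∧ b ≠ []
      · rw [show pvFilt [pvSlot b] = [b] from by
          unfold pvSlot; rw [if_neg h1, if_pos h0.1]
          show pvFilt [some b] = [b]
          simp [pvFilt, h0.2]]
        rw [show pvF (b :: l) = b :: pvF l from by
          simp only [pvF]; rw [if_neg h1, if_pos h0]]
        rfl
      · rw [show pvFilt [pvSlot b] = [] from by
          unfold pvSlot
          rw [if_neg h1]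
          by_cases hc : PySem.List.count b (0:Int) = 0
          · have hb : b = [] := by
              by_contra hb; exact h0 ⟨hc, hb⟩
            rw [if_pos hc, hb]; rfl
          · rw [if_neg hc]; rfl]
        rw [List.nil_append]
        rw [show pvF (b :: l) = pvF l from by
          simp only [pvF]; rw [if_neg h1, if_neg h0]]

-- A's classification fold, characterised (phase 1 of port A)
theorem pv_phaseA (l : List (Int × List Int)) :
    ∀ (a : List Int) (b : List Int) (c : List (Option (List Int))),
    l.foldl (fun (acc : List Int × List Int × List (Option (List Int))) ib =>
      if PySem.List.count ib.2 (0:Int) = 1 then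
        (acc.1 ++ [ib.1], acc.2.1 ++ [pvSalv ib.2], acc.2.2 ++ [none])
      else if PySem.List.count ib.2 (0:Int) = 0 then
        (acc.1, acc.2.1, acc.2.2 ++ [some ib.2])
      else (acc.1, acc.2.1, acc.2.2 ++ [none])) (a, b, c)
    = (a ++ (l.filterMap (fun ib => if PySem.List.count ib.2 (0:Int) = 1 then some (ib.1, pvSalv ib.2) else none)).map (·.1),
       b ++ (l.filterMap (fun ib => if PySem.List.count ib.2 (0:Int) = 1 then some (ib.1, pvSalv ib.2) else none)).map (·.2),
       c ++ l.map (fun ib => if PySem.List.count ib.2 (0:Int) = 1 then none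
            else if PySem.List.count ib.2 (0:Int) = 0 then some ib.2 else none)) := by
  induction l with
  | nil => intro a b c; simp
  | cons x xs ih =>
    intro a b c
    simp only [List.foldl_cons, List.filterMap_cons, List.map_cons]
    by_cases h1 : PySem.List.count x.2 (0:Int) = 1
    · simp only [if_pos h1, ih]; simp
    · by_cases h0 : PySem.List.count x.2 (0:Int) = 0
      · simp only [if_neg h1, if_pos h0, ih]; simp
      · simp only [if_neg h1, if_neg h0, ih]; simp

-- the singles' positions produced by enumerate are pvIdx shifted by the start index
theorem pv_enum_idx (l : List (List Int)) : ∀ k : Int,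
    ((PySem.List.enumerate l k).filterMap
      (fun ib => if PySem.List.count ib.2 (0:Int) = 1 then some (ib.1, pvSalv ib.2) else none)).map (·.1)
    = (pvIdx l).map (· + k) := by
  induction l with
  | nil => intro k; simp [PySem.List.enumerate_nil, pvIdx]
  | cons b l ih =>
    intro k
    rw [PySem.List.enumerate_cons, List.filterMap_cons]
    by_cases h1 : PySem.List.count b (0:Int) = 1
    · simp only [if_pos h1, List.map_cons, ih (k + 1), pvIdx_cons]
      congr 1
      · omega
      · rw [List.map_map]
        apply List.map_congr_left; intro x _
        simp only [Function.comp_apply]; omega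
    · simp only [if_neg h1, ih (k + 1), pvIdx_cons]
      rw [List.map_map]
      apply List.map_congr_left; intro x _
      simp only [Function.comp_apply]; omega

theorem pv_enum_sv (l : List (List Int)) : ∀ k : Int,
    ((PySem.List.enumerate l k).filterMap
      (fun ib => if PySem.List.count ib.2 (0:Int) = 1 then some (ib.1, pvSalv ib.2) else none)).map (·.2)
    = pvSv l := by
  induction l with
  | nil => intro k; simp [PySem.List.enumerate_nil, pvSv]
  | cons b l ih =>
    intro k
    rw [PySem.List.enumerate_cons, List.filterMap_cons]
    by_cases h1 : PySem.List.count b (0:Int) = 1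
    · simp only [if_pos h1, List.map_cons, ih (k + 1), pvSv_cons]
    · simp only [if_neg h1, ih (k + 1), pvSv_cons]

theorem pv_enum_map_snd {β : Type} (F : List Int → β) (xs : List (List Int)) :
    ∀ s : Int, (PySem.List.enumerate xs s).map (fun ib => F ib.2) = xs.map F := by
  induction xs with
  | nil => intro s; simp [PySem.List.enumerate_nil]
  | cons x xs ih => intro s; simp [PySem.List.enumerate_cons, ih]

-- B's loop body and finalisation, named for the proof (identical to the port's lambda)
def pvStepB (acc : List (List Int) × Option (Int × List (List Int))) (box : List Int) :
    List (List Int) × Option (Int × List (List Int)) :=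
  if PySem.List.count box (0:Int) = 1 then
    match acc.2 with
    | none => (acc.1, some (pvSalv box, []))
    | some p => (acc.1 ++ [[p.1, pvSalv box]] ++ p.2, none)
  else if PySem.List.count box (0:Int) = 0 ∧ box ≠ [] then
    match acc.2 with
    | none => (acc.1 ++ [box], acc.2)
    | some p => (acc.1, some (p.1, p.2 ++ [box]))
  else acc

def pvFin (st : List (List Int) × Option (Int × List (List Int))) : List (List Int) :=
  match st.2 with
  | some p => st.1 ++ p.2
  | none => st.1

theorem pv_B (l : List (List Int)) :
    (∀ out : List (List Int), pvFin (l.foldl pvStepB (out, none)) = out ++ pvF l)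
    ∧ (∀ (out : List (List Int)) (s : Int) (buf : List (List Int)),
        pvFin (l.foldl pvStepB (out, some (s, buf))) = out ++ pvG s buf l) := by
  induction l with
  | nil =>
    constructor
    · intro out; simp [pvFin, pvF]
    · intro out s buf; simp [pvFin, pvG]
  | cons b l ih =>
    constructor
    · intro out
      rw [List.foldl_cons]
      by_cases h1 : PySem.List.count b (0:Int) = 1
      · rw [show pvStepB (out, none) b = (out, some (pvSalv b, [])) from by
          unfold pvStepB; rw [if_pos h1]]
        rw [ih.2 out (pvSalv b) []]
        rw [show pvF (b :: l) = pvG (pvSalv b) [] l from by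
          simp only [pvF]; rw [if_pos h1]]
      · by_cases h0 : PySem.List.count b (0:Int) = 0 ∧ b ≠ []
        · rw [show pvStepB (out, none) b = (out ++ [b], none) from by
            unfold pvStepB; rw [if_neg h1, if_pos h0]]
          rw [ih.1 (out ++ [b])]
          rw [show pvF (b :: l) = b :: pvF l from by
            simp only [pvF]; rw [if_neg h1, if_pos h0]]
          simp
        · rw [show pvStepB (out, none) b = (out, none) from by
            unfold pvStepB; rw [if_neg h1, if_neg h0]]
          rw [ih.1 out]
          rw [show pvF (b :: l) = pvF l from by
            simp only [pvF]; rw [if_neg h1, if_neg h0]]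
    · intro out s buf
      rw [List.foldl_cons]
      by_cases h1 : PySem.List.count b (0:Int) = 1
      · rw [show pvStepB (out, some (s, buf)) b = (out ++ [[s, pvSalv b]] ++ buf, none) from by
          unfold pvStepB; rw [if_pos h1]]
        rw [ih.1 (out ++ [[s, pvSalv b]] ++ buf)]
        rw [show pvG s buf (b :: l) = ([s, pvSalv b] :: buf) ++ pvF l from by
          simp only [pvG]; rw [if_pos h1]]
        simp
      · by_cases h0 : PySem.List.count b (0:Int) = 0 ∧ b ≠ []
        · rw [show pvStepB (out, some (s, buf)) b = (out, some (s, buf ++ [b])) from by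
            unfold pvStepB; rw [if_neg h1, if_pos h0]]
          rw [ih.2 out s (buf ++ [b])]
          rw [show pvG s buf (b :: l) = pvG s (buf ++ [b]) l from by
            simp only [pvG]; rw [if_neg h1, if_pos h0]]
        · rw [show pvStepB (out, some (s, buf)) b = (out, some (s, buf)) from by
            unfold pvStepB; rw [if_neg h1, if_neg h0]]
          rw [ih.2 out s buf]
          rw [show pvG s buf (b :: l) = pvG s buf l from by
            simp only [pvG]; rw [if_neg h1, if_neg h0]]

-- ===== VERDICT (by name: the statement is the Claim_ definition above) =====
theorem Yang_day41_spec : Claim_equal_Yang_day41 := by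
  intro apples _ _
  unfold Spec_Yang_day41
  -- B side equals pvF
  have hB : Yang_day41_alt apples = pvF apples := by
    have h := (pv_B apples).1 []
    rw [List.nil_append] at h
    show pvFin (apples.foldl pvStepB ([], none)) = pvF apples
    exact h
  -- A side equals pvF
  have hA : Yang_day41 apples = pvF apples := by
    show pvFilt (Yang_day41_pairLoop _ _ _) = pvF apples
    rw [pv_phaseA (PySem.List.enumerate apples 0) [] [] []]
    simp only [List.nil_append]
    rw [pv_enum_idx apples 0, pv_enum_sv apples 0]
    rw [show (pvIdx apples).map (· + (0 : Int)) = pvIdx apples from by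
      rw [List.map_congr_left (g := fun x => x) (by intro x _; show x + (0:Int) = x; omega)]
      exact List.map_id' _]
    rw [pv_enum_map_snd (fun b => if PySem.List.count b (0:Int) = 1 then none
        else if PySem.List.count b (0:Int) = 0 then some b else none) apples 0]
    exact (pv_main apples).1
  rw [hA, hB]
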